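-- pv_equiv track=rewrite | github.com/lanlou1554/3DMeetingRoomGeneration | judgeFishbowl.py | _handleInnerOuterCircleCommand
-- ===== SOURCE A (Python) =====
-- def _handleInnerOuterCircleCommand(addReduceCommands, currentInnerCircleNum, currentOuterCircleNum, lastInnerCircleNum, lastOuterCircleNum):
--     changeInnerCircleNum = currentInnerCircleNum
--     changeOuterCircleNum = currentOuterCircleNum
--     if changeOuterCircleNum == -1:
--         changeOuterCircleNum = 0
--     if changeInnerCircleNum == -1:
--         changeInnerCircleNum = 0
--
--     for command in addReduceCommands:
--         if command == "add inner":
--             currentInnerCircleNum = changeInnerCircleNum + lastInnerCircleNum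
--         elif command == "add outer":
--             currentOuterCircleNum = changeOuterCircleNum + lastOuterCircleNum
--         elif command == "sub inner":
--             currentInnerCircleNum = lastInnerCircleNum - changeInnerCircleNum
--             if currentInnerCircleNum < 0:
--                 currentInnerCircleNum = lastInnerCircleNum
--         elif command == "sub outer":
--             currentOuterCircleNum = lastOuterCircleNum - changeOuterCircleNum
--             if currentOuterCircleNum < 0:
--                 currentOuterCircleNum = lastOuterCircleNum
--
--
--     if currentInnerCircleNum == -1:
--         currentInnerCircleNum = lastInnerCircleNum
--     if currentOuterCircleNum == -1:
--         currentOuterCircleNum = lastOuterCircleNum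
--
--     return currentInnerCircleNum, currentOuterCircleNum
-- ===== SOURCE B (Python) =====
-- def _handleInnerOuterCircleCommand(addReduceCommands, currentInnerCircleNum, currentOuterCircleNum, lastInnerCircleNum, lastOuterCircleNum):
--     # Every command overwrites rather than accumulates, so only the LAST
--     # inner-affecting and the LAST outer-affecting command matter.
--     ci = 0 if currentInnerCircleNum == -1 else currentInnerCircleNum
--     co = 0 if currentOuterCircleNum == -1 else currentOuterCircleNum
--     inner_cmd = None
--     outer_cmd = None
--     for command in reversed(addReduceCommands):
--         if inner_cmd is None and command in ("add inner", "sub inner"):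
--             inner_cmd = command
--         if outer_cmd is None and command in ("add outer", "sub outer"):
--             outer_cmd = command
--     if inner_cmd is None:
--         inner = currentInnerCircleNum
--     elif inner_cmd == "add inner":
--         inner = ci + lastInnerCircleNum
--     else:
--         inner = lastInnerCircleNum - ci
--         if inner < 0:
--             inner = lastInnerCircleNum
--     if outer_cmd is None:
--         outer = currentOuterCircleNum
--     elif outer_cmd == "add outer":
--         outer = co + lastOuterCircleNum
--     else:
--         outer = lastOuterCircleNum - co
--         if outer < 0:
--             outer = lastOuterCircleNum
--     if inner == -1:
--         inner = lastInnerCircleNum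
--     if outer == -1:
--         outer = lastOuterCircleNum
--     return inner, outer
-- ===== Notes on version B (the rewrite author's own statement) =====
-- stated objective: alternative
-- what changed: Instead of replaying every command through the if/elif loop, B scans the list once in reverse to find only the last inner-affecting and last outer-affecting command and computes each count directly from that deciding command.
import Mathlib
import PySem

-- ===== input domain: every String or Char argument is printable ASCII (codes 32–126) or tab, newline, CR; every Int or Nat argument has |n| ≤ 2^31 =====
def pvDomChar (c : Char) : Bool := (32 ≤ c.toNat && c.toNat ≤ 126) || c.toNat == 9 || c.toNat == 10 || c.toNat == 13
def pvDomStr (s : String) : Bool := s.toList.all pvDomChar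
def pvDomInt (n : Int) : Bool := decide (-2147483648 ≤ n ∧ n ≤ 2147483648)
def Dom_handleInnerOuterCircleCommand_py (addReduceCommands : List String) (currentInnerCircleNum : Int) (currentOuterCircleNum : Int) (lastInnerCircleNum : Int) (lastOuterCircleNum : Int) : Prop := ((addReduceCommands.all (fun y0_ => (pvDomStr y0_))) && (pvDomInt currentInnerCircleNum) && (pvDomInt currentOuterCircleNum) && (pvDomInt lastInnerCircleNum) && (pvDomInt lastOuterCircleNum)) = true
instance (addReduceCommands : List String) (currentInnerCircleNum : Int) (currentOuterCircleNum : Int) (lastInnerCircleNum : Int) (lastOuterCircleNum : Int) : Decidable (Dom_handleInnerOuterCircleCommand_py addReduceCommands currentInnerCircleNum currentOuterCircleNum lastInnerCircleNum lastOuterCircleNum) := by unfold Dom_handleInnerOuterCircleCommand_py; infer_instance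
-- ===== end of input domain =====

-- B finds only the last inner-affecting and last outer-affecting command (reverse scan) instead of replaying every command; same return value, alternative decomposition.


-- ===== PORT A =====
def pvStepA (ci co lI lO : Int) (st : Int × Int) (c : String) : Int × Int :=
  if c == "add inner" then (ci + lI, st.2)
  else if c == "add outer" then (st.1, co + lO)
  else if c == "sub inner" then
    (let v := lI - ci; if v < 0 then (lI, st.2) else (v, st.2))
  else if c == "sub outer" then
    (let v := lO - co; if v < 0 then (st.1, lO) else (st.1, v))
  else st

def handleInnerOuterCircleCommand_py (addReduceCommands : List String) (currentInnerCircleNum : Int) (currentOuterCircleNum : Int) (lastInnerCircleNum : Int) (lastOuterCircleNum : Int) : Int × Int :=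
  let changeInner := if currentInnerCircleNum == -1 then 0 else currentInnerCircleNum
  let changeOuter := if currentOuterCircleNum == -1 then 0 else currentOuterCircleNum
  let st := addReduceCommands.foldl (pvStepA changeInner changeOuter lastInnerCircleNum lastOuterCircleNum) (currentInnerCircleNum, currentOuterCircleNum)
  let i := if st.1 == -1 then lastInnerCircleNum else st.1
  let o := if st.2 == -1 then lastOuterCircleNum else st.2
  (i, o)

-- ===== PORT B =====
-- reverse scan recording the first inner-type / outer-type command seen (= the last in the original order)
def pvFindDeciding : List String → Option String × Option String → Option String × Option String
  | [], acc => acc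
  | c :: rest, acc =>
    let i := if acc.1.isNone && (c == "add inner" || c == "sub inner") then some c else acc.1
    let o := if acc.2.isNone && (c == "add outer" || c == "sub outer") then some c else acc.2
    pvFindDeciding rest (i, o)

def handleInnerOuterCircleCommand_py_alt (addReduceCommands : List String) (currentInnerCircleNum : Int) (currentOuterCircleNum : Int) (lastInnerCircleNum : Int) (lastOuterCircleNum : Int) : Int × Int :=
  let ci := if currentInnerCircleNum == -1 then 0 else currentInnerCircleNum
  let co := if currentOuterCircleNum == -1 then 0 else currentOuterCircleNum
  let dec := pvFindDeciding addReduceCommands.reverse (none, none)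
  let inner := match dec.1 with
    | none => currentInnerCircleNum
    | some c =>
      if c == "add inner" then ci + lastInnerCircleNum
      else (let v := lastInnerCircleNum - ci; if v < 0 then lastInnerCircleNum else v)
  let outer := match dec.2 with
    | none => currentOuterCircleNum
    | some c =>
      if c == "add outer" then co + lastOuterCircleNum
      else (let v := lastOuterCircleNum - co; if v < 0 then lastOuterCircleNum else v)
  let inner := if inner == -1 then lastInnerCircleNum else inner
  let outer := if outer == -1 then lastOuterCircleNum else outer
  (inner, outer)

-- ===== PRECONDITION & SPEC =====
def Spec_handleInnerOuterCircleCommand_py (addReduceCommands : List String) (currentInnerCircleNum : Int) (currentOuterCircleNum : Int) (lastInnerCircleNum : Int) (lastOuterCircleNum : Int) (out : Int × Int) : Prop := out = handleInnerOuterCircleCommand_py_alt addReduceCommands currentInnerCircleNum currentOuterCircleNum lastInnerCircleNum lastOuterCircleNum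
instance (addReduceCommands : List String) (currentInnerCircleNum : Int) (currentOuterCircleNum : Int) (lastInnerCircleNum : Int) (lastOuterCircleNum : Int) (out : Int × Int) : Decidable (Spec_handleInnerOuterCircleCommand_py addReduceCommands currentInnerCircleNum currentOuterCircleNum lastInnerCircleNum lastOuterCircleNum out) := by unfold Spec_handleInnerOuterCircleCommand_py; infer_instance

-- ===== CLAIM (what is proved, stated in full; the proofs are below) =====
def Claim_equal_handleInnerOuterCircleCommand_py : Prop := ∀ (addReduceCommands : List String) (currentInnerCircleNum : Int) (currentOuterCircleNum : Int) (lastInnerCircleNum : Int) (lastOuterCircleNum : Int), Dom_handleInnerOuterCircleCommand_py addReduceCommands currentInnerCircleNum currentOuterCircleNum lastInnerCircleNum lastOuterCircleNum → Spec_handleInnerOuterCircleCommand_py addReduceCommands currentInnerCircleNum currentOuterCircleNum lastInnerCircleNum lastOuterCircleNum (handleInnerOuterCircleCommand_py addReduceCommands currentInnerCircleNum currentOuterCircleNum lastInnerCircleNum lastOuterCircleNum)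

-- ===== LEMMAS AND PROOFS =====

def pvIsInner (c : String) : Bool := c == "add inner" || c == "sub inner"
def pvIsOuter (c : String) : Bool := c == "add outer" || c == "sub outer"
def pvInnerVal (ci lI : Int) (c : String) : Int :=
  if c == "add inner" then ci + lI else (let v := lI - ci; if v < 0 then lI else v)
def pvOuterVal (co lO : Int) (c : String) : Int :=
  if c == "add outer" then co + lO else (let v := lO - co; if v < 0 then lO else v)

theorem pvStepA_fst (ci co lI lO a b : Int) (x : String) :
    (pvStepA ci co lI lO (a, b) x).1 = if pvIsInner x then pvInnerVal ci lI x else a := by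
  simp only [pvStepA, pvIsInner, pvInnerVal]
  by_cases h1 : x = "add inner" <;> by_cases h2 : x = "add outer" <;>
    by_cases h3 : x = "sub inner" <;> by_cases h4 : x = "sub outer" <;>
    simp_all <;> split <;> simp

theorem pvStepA_snd (ci co lI lO a b : Int) (x : String) :
    (pvStepA ci co lI lO (a, b) x).2 = if pvIsOuter x then pvOuterVal co lO x else b := by
  simp only [pvStepA, pvIsOuter, pvOuterVal]
  by_cases h1 : x = "add inner" <;> by_cases h2 : x = "add outer" <;>
    by_cases h3 : x = "sub inner" <;> by_cases h4 : x = "sub outer" <;>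
    simp_all <;> split <;> simp

theorem pvFindDeciding_fst (xs : List String) (i o : Option String) :
    (pvFindDeciding xs (i, o)).1 = (i.or (xs.find? pvIsInner)) := by
  induction xs generalizing i o with
  | nil => simp [pvFindDeciding]
  | cons c rest ih =>
    simp only [pvFindDeciding, ih, List.find?]
    cases i with
    | none => cases h : pvIsInner c <;> simp_all [pvIsInner]
    | some v => simp

theorem pvFindDeciding_snd (xs : List String) (i o : Option String) :
    (pvFindDeciding xs (i, o)).2 = (o.or (xs.find? pvIsOuter)) := by
  induction xs generalizing i o with
  | nil => simp [pvFindDeciding]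
  | cons c rest ih =>
    simp only [pvFindDeciding, ih, List.find?]
    cases o with
    | none => cases h : pvIsOuter c <;> simp_all [pvIsOuter]
    | some v => simp

theorem pvFoldA_fst (ci co lI lO : Int) (xs : List String) (a b : Int) :
    (List.foldl (pvStepA ci co lI lO) (a, b) xs).1 =
      match xs.reverse.find? pvIsInner with
      | none => a
      | some c => pvInnerVal ci lI c := by
  induction xs generalizing a b with
  | nil => simp
  | cons x rest ih =>
    simp only [List.foldl_cons, List.reverse_cons, List.find?_append]
    cases st : pvStepA ci co lI lO (a, b) x with
    | mk a' b' =>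
      rw [ih a' b']
      cases h : rest.reverse.find? pvIsInner with
      | some c => simp
      | none =>
        have : a' = if pvIsInner x then pvInnerVal ci lI x else a := by
          rw [← pvStepA_fst ci co lI lO a b x, st]
        subst this
        cases hx : pvIsInner x <;> simp [List.find?, hx]

theorem pvFoldA_snd (ci co lI lO : Int) (xs : List String) (a b : Int) :
    (List.foldl (pvStepA ci co lI lO) (a, b) xs).2 =
      match xs.reverse.find? pvIsOuter with
      | none => b
      | some c => pvOuterVal co lO c := by
  induction xs generalizing a b with
  | nil => simp
  | cons x rest ih =>
    simp only [List.foldl_cons, List.reverse_cons, List.find?_append]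
    cases st : pvStepA ci co lI lO (a, b) x with
    | mk a' b' =>
      rw [ih a' b']
      cases h : rest.reverse.find? pvIsOuter with
      | some c => simp
      | none =>
        have : b' = if pvIsOuter x then pvOuterVal co lO x else b := by
          rw [← pvStepA_snd ci co lI lO a b x, st]
        subst this
        cases hx : pvIsOuter x <;> simp [List.find?, hx]

-- ===== VERDICT (by name: the statement is the Claim_ definition above) =====
theorem handleInnerOuterCircleCommand_py_spec : Claim_equal_handleInnerOuterCircleCommand_py := by
  intro cmds curI curO lI lO _
  unfold Spec_handleInnerOuterCircleCommand_py
  unfold handleInnerOuterCircleCommand_py handleInnerOuterCircleCommand_py_alt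
  simp only [pvFoldA_fst, pvFoldA_snd, pvFindDeciding_fst, pvFindDeciding_snd, Option.or]
  cases hI : cmds.reverse.find? pvIsInner <;> cases hO : cmds.reverse.find? pvIsOuter <;>
    simp [pvIsInner, pvIsOuter, pvInnerVal, pvOuterVal] at hI hO ⊢
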